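-- pv_equiv track=rewrite | github.com/hyeinhyun/alg_prac | boj/1261.py | solution
-- ===== SOURCE A (Python) =====
-- from collections import deque
--
-- def solution(maps):
--     N,M=len(maps),len(maps[0])
--     q=deque([])
--     q.append((0,0))
--     v=[[100000]*M for i in range(N)]
--     v[0][0]=0
--     X=[0,0,-1,1]
--     Y=[1,-1,0,0]
--     while q:
--         cur_x,cur_y=q.popleft()
--         wall=v[cur_x][cur_y]
--         for i in range(4):
--             n_x=X[i]+cur_x
--             n_y=Y[i]+cur_y
--             if n_x>=0 and n_x<N and n_y>=0 and n_y<M: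
--                 if maps[n_x][n_y]==1:
--                     if v[n_x][n_y]>wall+1:
--                         v[n_x][n_y]=wall+1
--                         q.append((n_x,n_y))
--                 else:
--                     if v[n_x][n_y]>wall:
--                         v[n_x][n_y]=wall
--                         q.append((n_x,n_y))
--     return v[N-1][M-1]
-- ===== SOURCE B (Python) =====
-- def solution(maps):
--     N, M = len(maps), len(maps[0])
--     v = [[100000] * M for _ in range(N)]
--     v[0][0] = 0
--     while True:
--         nv = [[min([v[x][y]] + [v[x + dx][y + dy] + (1 if maps[x][y] == 1 else 0)
--                                 for dx, dy in ((0, 1), (0, -1), (-1, 0), (1, 0))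
--                                 if 0 <= x + dx < N and 0 <= y + dy < M])
--                for y in range(M)] for x in range(N)]
--         if nv == v:
--             break
--         v = nv
--     return v[N - 1][M - 1]
-- ===== Notes on version B (the rewrite author's own statement) =====
-- stated objective: alternative
-- what changed: A's queue-driven SPFA-style relaxation (deque of cells whose improvement must be propagated) is replaced by queueless round-based Jacobi/Bellman-Ford iteration: repeatedly rebuild the whole distance table from its neighbours until it stops changing.
import Mathlib
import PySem

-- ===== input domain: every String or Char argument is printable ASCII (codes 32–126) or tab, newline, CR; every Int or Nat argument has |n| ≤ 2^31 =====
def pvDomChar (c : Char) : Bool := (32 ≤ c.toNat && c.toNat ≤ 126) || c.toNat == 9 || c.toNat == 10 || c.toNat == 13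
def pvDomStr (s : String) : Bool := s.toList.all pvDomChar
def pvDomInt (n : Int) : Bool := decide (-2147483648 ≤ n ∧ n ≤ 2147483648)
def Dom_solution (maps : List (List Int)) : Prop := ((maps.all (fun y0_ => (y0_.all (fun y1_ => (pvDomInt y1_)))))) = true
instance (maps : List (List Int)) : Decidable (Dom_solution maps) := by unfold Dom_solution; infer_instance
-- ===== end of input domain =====

-- B replaces A's queue-driven (SPFA-style) relaxation by round-based Jacobi/Bellman-Ford
-- relaxation of the whole table until it stabilises (objective: alternative algorithm).
-- Both ports carry a fuel parameter that is proved large enough, so the fuel-exhausted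
-- branch is never taken on inputs satisfying Pre_solution.

-- ===== PORT A =====

-- shared table helpers: v[x][y] read and write on a list-of-lists table
def pvGet (v : List (List Int)) (x y : Nat) : Int := (v.getD x []).getD y 0

def pvSet (v : List (List Int)) (x y : Nat) (a : Int) : List (List Int) :=
  v.set x ((v.getD x []).set y a)

-- the four (dx, dy) direction pairs zip(X, Y) of A
def pvDirs : List (Int × Int) := [(0,1),(0,-1),(-1,0),(1,0)]

-- the initial table: [[100000]*M for i in range(N)] with v[0][0] = 0
def pvInit (N M : Nat) : List (List Int) :=
  pvSet (List.replicate N (List.replicate M (100000 : Int))) 0 0 0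

-- one direction of A's inner 'for i in range(4)' loop, acting on the state (v, q)
def pvStep (maps : List (List Int)) (N M : Nat) (cx cy wall : Int)
    (st : List (List Int) × List (Int × Int)) (d : Int × Int) :
    List (List Int) × List (Int × Int) :=
  let nx := d.1 + cx
  let ny := d.2 + cy
  if 0 ≤ nx ∧ nx < (N : Int) ∧ 0 ≤ ny ∧ ny < (M : Int) then
    if (maps.getD nx.toNat []).getD ny.toNat 0 = 1 then
      if wall + 1 < pvGet st.1 nx.toNat ny.toNat then
        (pvSet st.1 nx.toNat ny.toNat (wall + 1), st.2 ++ [(nx, ny)])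
      else st
    else
      if wall < pvGet st.1 nx.toNat ny.toNat then
        (pvSet st.1 nx.toNat ny.toNat wall, st.2 ++ [(nx, ny)])
      else st
  else st

-- A's 'while q' loop (fuel is proved sufficient below; the 0 branch is dead under Pre_)
def pvLoopA (maps : List (List Int)) (N M : Nat) :
    Nat → List (List Int) → List (Int × Int) → List (List Int)
  | 0, v, _ => v
  | _ + 1, v, [] => v
  | f + 1, v, (cx, cy) :: q' =>
    let wall := pvGet v cx.toNat cy.toNat
    let st := pvDirs.foldl (pvStep maps N M cx cy wall) (v, q')
    pvLoopA maps N M f st.1 st.2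

def solution (maps : List (List Int)) : Int :=
  let N := maps.length
  let M := (maps.headD []).length
  let vf := pvLoopA maps N M (2 * 100000 * (N * M) + 2) (pvInit N M) [((0 : Int), (0 : Int))]
  pvGet vf (N - 1) (M - 1)

-- ===== PORT B =====

-- cost of entering cell (x, y): 1 if maps[x][y] == 1 else 0
def pvCost (maps : List (List Int)) (x y : Nat) : Int :=
  if (maps.getD x []).getD y 0 = 1 then 1 else 0

-- the inner comprehension: neighbour candidates v[x+dx][y+dy] + cost(x,y) for in-bounds dirs
def pvCands (maps : List (List Int)) (N M : Nat) (v : List (List Int)) (x y : Nat) : List Int :=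
  pvDirs.filterMap (fun d =>
    if 0 ≤ (x : Int) + d.1 ∧ (x : Int) + d.1 < (N : Int) ∧
       0 ≤ (y : Int) + d.2 ∧ (y : Int) + d.2 < (M : Int) then
      some (pvGet v ((x : Int) + d.1).toNat ((y : Int) + d.2).toNat + pvCost maps x y)
    else none)

-- one global relaxation round: nv = [[min([v[x][y]] + candidates) for y ...] for x ...]
def pvRelax (maps : List (List Int)) (N M : Nat) (v : List (List Int)) : List (List Int) :=
  (List.range N).map fun x => (List.range M).map fun y =>
    (PySem.List.min? (pvGet v x y :: pvCands maps N M v x y) (fun z => z)).getD 0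

-- B's 'while True' loop (fuel proved sufficient below; the 0 branch is dead under Pre_)
def pvLoopB (maps : List (List Int)) (N M : Nat) : Nat → List (List Int) → List (List Int)
  | 0, v => v
  | f + 1, v =>
    let nv := pvRelax maps N M v
    if nv = v then v else pvLoopB maps N M f nv

def solution_alt (maps : List (List Int)) : Int :=
  let N := maps.length
  let M := (maps.headD []).length
  let vf := pvLoopB maps N M (100000 * (N * M) + 1) (pvInit N M)
  pvGet vf (N - 1) (M - 1)

-- ===== PRECONDITION & SPEC =====
-- Pre_ excludes exactly the inputs on which the Python A raises: an empty maps or an empty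
-- first row (IndexError on maps[0] / v[0][0]), and rows shorter than the first row, whose
-- missing cells the search reads (IndexError on maps[n_x][n_y]).
def Pre_solution (maps : List (List Int)) : Prop :=
  maps ≠ [] ∧ 0 < (maps.headD []).length ∧
    ∀ row ∈ maps, (maps.headD []).length ≤ row.length

instance (maps : List (List Int)) : Decidable (Pre_solution maps) := by
  unfold Pre_solution; infer_instance

def pvWitness_solution : List (List Int) := [[0, 1], [1, 0]]

def Spec_solution (maps : List (List Int)) (out : Int) : Prop := out = solution_alt maps
instance (maps : List (List Int)) (out : Int) : Decidable (Spec_solution maps out) := by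
  unfold Spec_solution; infer_instance

-- ===== CLAIM (what is proved, stated in full; the proofs are below) =====
def Claim_equal_solution : Prop :=
  ∀ (maps : List (List Int)), Dom_solution maps → Pre_solution maps →
    Spec_solution maps (solution maps)

-- ===== LEMMAS AND PROOFS =====

-- abstract view of tables of shape N × M
def InB (N M : Nat) (p : Int × Int) : Prop :=
  0 ≤ p.1 ∧ p.1 < (N : Int) ∧ 0 ≤ p.2 ∧ p.2 < (M : Int)

def Shape (N M : Nat) (v : List (List Int)) : Prop :=
  v.length = N ∧ ∀ row ∈ v, row.length = M

def TLE (N M : Nat) (u v : List (List Int)) : Prop :=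
  ∀ x y, x < N → y < M → pvGet u x y ≤ pvGet v x y

def NonnegT (N M : Nat) (v : List (List Int)) : Prop :=
  ∀ x y, x < N → y < M → 0 ≤ pvGet v x y

def UBT (N M : Nat) (v : List (List Int)) : Prop :=
  ∀ x y, x < N → y < M → pvGet v x y ≤ 100000

def RelaxedDir (maps : List (List Int)) (N M : Nat) (v : List (List Int))
    (x y : Nat) (d : Int × Int) : Prop :=
  ∀ nx ny : Int, nx = d.1 + (x : Int) → ny = d.2 + (y : Int) →
    0 ≤ nx → nx < (N : Int) → 0 ≤ ny → ny < (M : Int) →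
    pvGet v nx.toNat ny.toNat ≤ pvGet v x y + pvCost maps nx.toNat ny.toNat

def RelaxedOut (maps : List (List Int)) (N M : Nat) (v : List (List Int)) (x y : Nat) : Prop :=
  ∀ d ∈ pvDirs, RelaxedDir maps N M v x y d

def RelaxedT (maps : List (List Int)) (N M : Nat) (v : List (List Int)) : Prop :=
  ∀ x y : Nat, x < N → y < M → RelaxedOut maps N M v x y

def SN (N M : Nat) (v : List (List Int)) : Nat :=
  ∑ x ∈ Finset.range N, ∑ y ∈ Finset.range M, (pvGet v x y).toNat

def GoodA (maps : List (List Int)) (N M : Nat) (w v : List (List Int))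
    (q : List (Int × Int)) : Prop :=
  Shape N M v ∧ TLE N M w v ∧ UBT N M v ∧ pvGet v 0 0 = 0 ∧
  (∀ p ∈ q, InB N M p) ∧
  (∀ x y : Nat, x < N → y < M → RelaxedOut maps N M v x y ∨ ((x : Int), (y : Int)) ∈ q)

-- basic table lemmas
theorem pv_get_set_self {N M : Nat} {v : List (List Int)} (hs : Shape N M v)
    {x y : Nat} (hx : x < N) (hy : y < M) (a : Int) :
    pvGet (pvSet v x y a) x y = a := by
  obtain ⟨hl, hr⟩ := hs
  have hx' : x < v.length := by omega
  have hrow : (v.getD x []).length = M := by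
    rw [List.getD_eq_getElem v [] hx']
    exact hr _ (List.getElem_mem hx')
  have hy' : y < v[x].length := by
    rw [← List.getD_eq_getElem v [] hx']; omega
  simp [pvGet, pvSet, List.getD, hx', hy']

theorem pv_get_set_ne {v : List (List Int)} {x y x' y' : Nat} (h : x' ≠ x ∨ y' ≠ y) (a : Int) :
    pvGet (pvSet v x y a) x' y' = pvGet v x' y' := by
  rcases h with h | h
  · simp [pvGet, pvSet, List.getD, List.getElem?_set_ne (fun he => h he.symm)]
  · by_cases hx : x' = x
    · subst hx
      by_cases hx' : x' < v.length
      · simp [pvGet, pvSet, List.getD, hx',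
          List.getElem?_set_ne (fun he => h he.symm)]
      · unfold pvGet pvSet
        rw [List.set_eq_of_length_le (by omega)]
    · simp [pvGet, pvSet, List.getD, List.getElem?_set_ne (fun he => hx he.symm)]

theorem pv_shape_set {N M : Nat} {v : List (List Int)} (hs : Shape N M v) (x y : Nat) (a : Int) :
    Shape N M (pvSet v x y a) := by
  obtain ⟨hl, hr⟩ := hs
  by_cases hx' : x < v.length
  · refine ⟨by simpa [pvSet] using hl, ?_⟩
    intro row hrow
    rcases List.mem_or_eq_of_mem_set hrow with h | h
    · exact hr _ h
    · subst h
      rw [List.length_set, List.getD_eq_getElem v [] hx']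
      exact hr _ (List.getElem_mem hx')
  · rw [pvSet, List.set_eq_of_length_le (by omega)]
    exact ⟨hl, hr⟩

theorem pv_tables_ext {N M : Nat} {u v : List (List Int)} (hu : Shape N M u) (hv : Shape N M v)
    (h : ∀ x y, x < N → y < M → pvGet u x y = pvGet v x y) : u = v := by
  obtain ⟨hul, hur⟩ := hu
  obtain ⟨hvl, hvr⟩ := hv
  apply List.ext_getElem (by omega)
  intro x hx1 hx2
  apply List.ext_getElem
  · rw [hur _ (List.getElem_mem hx1), hvr _ (List.getElem_mem hx2)]
  intro y hy1 hy2
  have hx : x < N := by omega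
  have hy : y < M := by rw [hur _ (List.getElem_mem hx1)] at hy1; omega
  have := h x y hx hy
  rwa [pvGet, pvGet, List.getD_eq_getElem u [] hx1, List.getD_eq_getElem v [] hx2,
    List.getD_eq_getElem _ 0 hy1, List.getD_eq_getElem _ 0 hy2] at this

theorem pv_SN_lt {N M : Nat} {u v : List (List Int)} (hle : TLE N M u v) (hnn : NonnegT N M u)
    (h : ∃ x y, x < N ∧ y < M ∧ pvGet u x y < pvGet v x y) : SN N M u < SN N M v := by
  obtain ⟨x0, y0, hx0, hy0, hlt⟩ := h
  unfold SN
  apply Finset.sum_lt_sum (f := fun x => ∑ y ∈ Finset.range M, (pvGet u x y).toNat)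
  · intro i hi
    apply Finset.sum_le_sum
    intro j hj
    simp only [Finset.mem_range] at hi hj
    have := hle i j hi hj
    omega
  · refine ⟨x0, Finset.mem_range.mpr hx0, ?_⟩
    apply Finset.sum_lt_sum (f := fun y => (pvGet u x0 y).toNat)
    · intro j hj
      simp only [Finset.mem_range] at hj
      have := hle x0 j hx0 hj
      omega
    · refine ⟨y0, Finset.mem_range.mpr hy0, ?_⟩
      have := hnn x0 y0 hx0 hy0
      omega

theorem pv_SN_le {N M : Nat} {v : List (List Int)} (hub : UBT N M v) :
    SN N M v ≤ 100000 * (N * M) := by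
  unfold SN
  calc ∑ x ∈ Finset.range N, ∑ y ∈ Finset.range M, (pvGet v x y).toNat
      ≤ ∑ _x ∈ Finset.range N, ∑ _y ∈ Finset.range M, 100000 := by
        apply Finset.sum_le_sum
        intro i hi
        apply Finset.sum_le_sum
        intro j hj
        simp only [Finset.mem_range] at hi hj
        have := hub i j hi hj
        omega
    _ = 100000 * (N * M) := by
        simp [Finset.sum_const, Finset.card_range]
        ring

theorem pv_shape_init (N M : Nat) : Shape N M (pvInit N M) := by
  apply pv_shape_set
  constructor
  · simp
  · intro row hrow
    rw [List.eq_of_mem_replicate hrow]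
    simp

theorem pv_get_init {N M : Nat} {x y : Nat} (hx : x < N) (hy : y < M) :
    pvGet (pvInit N M) x y = if x = 0 ∧ y = 0 then 0 else 100000 := by
  have hsh : Shape N M (List.replicate N (List.replicate M (100000 : Int))) := by
    constructor
    · simp
    · intro row hrow
      rw [List.eq_of_mem_replicate hrow]
      simp
  have hget : ∀ x' y' : Nat, x' < N → y' < M →
      pvGet (List.replicate N (List.replicate M (100000 : Int))) x' y' = 100000 := by
    intro x' y' hx' hy'
    simp [pvGet, List.getD, hx', hy']
  by_cases h : x = 0 ∧ y = 0
  · obtain ⟨h1, h2⟩ := h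
    subst h1; subst h2
    simp [pvInit, pv_get_set_self hsh hx hy]
  · rw [pvInit, pv_get_set_ne (by omega), hget x y hx hy]
    simp [h]

theorem pv_cost_nonneg (maps : List (List Int)) (x y : Nat) : 0 ≤ pvCost maps x y := by
  unfold pvCost
  split <;> omega

theorem pv_dirs_neg {d : Int × Int} (hd : d ∈ pvDirs) : (-d.1, -d.2) ∈ pvDirs := by
  simp only [pvDirs, List.mem_cons, List.not_mem_nil, or_false] at hd ⊢
  rcases hd with h | h | h | h <;> subst h <;> norm_num

-- relax characterisation
theorem pv_get_relax {maps : List (List Int)} {N M : Nat} {v : List (List Int)} {x y : Nat}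
    (hx : x < N) (hy : y < M) :
    pvGet (pvRelax maps N M v) x y =
      (PySem.List.min? (pvGet v x y :: pvCands maps N M v x y) (fun z => z)).getD 0 := by
  simp [pvRelax, pvGet, List.getD, hx, hy]

theorem pv_min_cons_facts (a : Int) (l : List Int) :
    ∃ m, (PySem.List.min? (a :: l) (fun z => z)).getD 0 = m ∧ m ∈ a :: l ∧
      ∀ y ∈ a :: l, m ≤ y := by
  cases h : PySem.List.min? (a :: l) (fun z => z) with
  | none =>
    exact absurd ((PySem.List.min?_eq_none_iff _ _).mp h) (by simp)
  | some m =>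
    exact ⟨m, rfl, PySem.List.min?_mem h, fun y hy => PySem.List.min?_isMin h y hy⟩

theorem pv_shape_relax (maps : List (List Int)) (N M : Nat) (v : List (List Int)) :
    Shape N M (pvRelax maps N M v) := by
  constructor
  · simp [pvRelax]
  · intro row hrow
    simp only [pvRelax, List.mem_map] at hrow
    obtain ⟨x, _, hx⟩ := hrow
    simp [← hx]

theorem pv_relax_le {maps : List (List Int)} {N M : Nat} {v : List (List Int)} :
    TLE N M (pvRelax maps N M v) v := by
  intro x y hx hy
  rw [pv_get_relax hx hy]
  obtain ⟨m, hm, _, hmin⟩ := pv_min_cons_facts (pvGet v x y) (pvCands maps N M v x y)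
  rw [hm]
  exact hmin _ (by simp)

theorem pv_mem_cands {maps : List (List Int)} {N M : Nat} {v : List (List Int)} {x y : Nat}
    {c : Int} (hc : c ∈ pvCands maps N M v x y) :
    ∃ d ∈ pvDirs, 0 ≤ (x : Int) + d.1 ∧ (x : Int) + d.1 < (N : Int) ∧
      0 ≤ (y : Int) + d.2 ∧ (y : Int) + d.2 < (M : Int) ∧
      c = pvGet v ((x : Int) + d.1).toNat ((y : Int) + d.2).toNat + pvCost maps x y := by
  simp only [pvCands, List.mem_filterMap] at hc
  obtain ⟨d, hd, hopt⟩ := hc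
  refine ⟨d, hd, ?_⟩
  split at hopt
  · rename_i hcond
    obtain ⟨h1, h2, h3, h4⟩ := hcond
    exact ⟨h1, h2, h3, h4, (Option.some_inj.mp hopt).symm⟩
  · exact absurd hopt (by simp)

theorem pv_cands_mem {maps : List (List Int)} {N M : Nat} {v : List (List Int)} {x y : Nat}
    {d : Int × Int} (hd : d ∈ pvDirs)
    (h1 : 0 ≤ (x : Int) + d.1) (h2 : (x : Int) + d.1 < (N : Int))
    (h3 : 0 ≤ (y : Int) + d.2) (h4 : (y : Int) + d.2 < (M : Int)) :
    pvGet v ((x : Int) + d.1).toNat ((y : Int) + d.2).toNat + pvCost maps x y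
      ∈ pvCands maps N M v x y := by
  simp only [pvCands, List.mem_filterMap]
  exact ⟨d, hd, by rw [if_pos ⟨h1, h2, h3, h4⟩]⟩

theorem pv_relax_nonneg {maps : List (List Int)} {N M : Nat} {v : List (List Int)}
    (hv : NonnegT N M v) : NonnegT N M (pvRelax maps N M v) := by
  intro x y hx hy
  rw [pv_get_relax hx hy]
  obtain ⟨m, hm, hmem, _⟩ := pv_min_cons_facts (pvGet v x y) (pvCands maps N M v x y)
  rw [hm]
  rcases List.mem_cons.mp hmem with h | h
  · rw [h]; exact hv x y hx hy
  · obtain ⟨d, _, h1, h2, h3, h4, hc⟩ := pv_mem_cands h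
    rw [hc]
    have hget : 0 ≤ pvGet v ((x : Int) + d.1).toNat ((y : Int) + d.2).toNat := by
      apply hv <;> omega
    have := pv_cost_nonneg maps x y
    omega

theorem pv_relaxed_of_fix {maps : List (List Int)} {N M : Nat} {v : List (List Int)}
    (hfix : pvRelax maps N M v = v) : RelaxedT maps N M v := by
  intro x y hx hy d hd nx ny hnx hny h1 h2 h3 h4
  -- apply the fixpoint equation at the target cell, with the reversed direction
  have htx : nx.toNat < N := by omega
  have hty : ny.toNat < M := by omega
  have hfix' := congrArg (fun t => pvGet t nx.toNat ny.toNat) hfix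
  simp only at hfix'
  rw [pv_get_relax htx hty] at hfix'
  obtain ⟨m, hm, _, hmin⟩ :=
    pv_min_cons_facts (pvGet v nx.toNat ny.toNat) (pvCands maps N M v nx.toNat ny.toNat)
  rw [hm] at hfix'
  have hd' : (-d.1, -d.2) ∈ pvDirs := pv_dirs_neg hd
  have e1 : ((nx.toNat : Int) + (-d.1, -d.2).1) = (x : Int) := by simp; omega
  have e2 : ((ny.toNat : Int) + (-d.1, -d.2).2) = (y : Int) := by simp; omega
  have hcand := pv_cands_mem (maps := maps) (N := N) (M := M) (v := v)
    (x := nx.toNat) (y := ny.toNat) hd'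
    (by rw [e1]; omega) (by rw [e1]; exact_mod_cast hx)
    (by rw [e2]; omega) (by rw [e2]; exact_mod_cast hy)
  rw [e1, e2] at hcand
  simp only [Int.toNat_natCast] at hcand
  have := hmin _ (List.mem_cons_of_mem _ hcand)
  omega

theorem pv_le_relax {maps : List (List Int)} {N M : Nat} {w v : List (List Int)}
    (hw : RelaxedT maps N M w) (hle : TLE N M w v) : TLE N M w (pvRelax maps N M v) := by
  intro x y hx hy
  rw [pv_get_relax hx hy]
  obtain ⟨m, hm, hmem, _⟩ := pv_min_cons_facts (pvGet v x y) (pvCands maps N M v x y)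
  rw [hm]
  rcases List.mem_cons.mp hmem with h | h
  · rw [h]; exact hle x y hx hy
  · obtain ⟨d, hd, h1, h2, h3, h4, hc⟩ := pv_mem_cands h
    rw [hc]
    -- w is relaxed along the reversed direction from the neighbour back to (x, y)
    have hnb1 : ((x : Int) + d.1).toNat < N := by omega
    have hnb2 : ((y : Int) + d.2).toNat < M := by omega
    have hd' : (-d.1, -d.2) ∈ pvDirs := pv_dirs_neg hd
    have hrd := hw _ _ hnb1 hnb2 _ hd' (x : Int) (y : Int)
      (by simp; omega) (by simp; omega) (by omega) (by exact_mod_cast hx)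
      (by omega) (by exact_mod_cast hy)
    simp only [Int.toNat_natCast] at hrd
    have hle' := hle _ _ hnb1 hnb2
    omega

-- loop B lemmas
theorem pv_loopB_le {maps : List (List Int)} {N M : Nat} (f : Nat) (v : List (List Int)) :
    TLE N M (pvLoopB maps N M f v) v := by
  induction f generalizing v with
  | zero => intro x y hx hy; exact le_refl _
  | succ f ih =>
    rw [pvLoopB]
    split
    · intro x y hx hy; exact le_refl _
    · intro x y hx hy
      exact le_trans (ih (pvRelax maps N M v) x y hx hy) (pv_relax_le x y hx hy)

theorem pv_loopB_nonneg {maps : List (List Int)} {N M : Nat} {v : List (List Int)}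
    (hv : NonnegT N M v) (f : Nat) : NonnegT N M (pvLoopB maps N M f v) := by
  induction f generalizing v with
  | zero => exact hv
  | succ f ih =>
    rw [pvLoopB]
    split
    · exact hv
    · exact ih (pv_relax_nonneg hv)

theorem pv_loopB_fix {maps : List (List Int)} {N M : Nat} :
    ∀ (f : Nat) (v : List (List Int)), Shape N M v → NonnegT N M v → SN N M v < f →
      pvRelax maps N M (pvLoopB maps N M f v) = pvLoopB maps N M f v := by
  intro f
  induction f with
  | zero => intro v _ _ h; omega
  | succ f ih =>
    intro v hs hn hf
    rw [pvLoopB]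
    split
    · assumption
    · rename_i hne
      apply ih _ (pv_shape_relax maps N M v) (pv_relax_nonneg hn)
      have hlt : SN N M (pvRelax maps N M v) < SN N M v := by
        apply pv_SN_lt (fun x y hx hy => pv_relax_le x y hx hy) (pv_relax_nonneg hn)
        by_contra hno
        push Not at hno
        apply hne
        apply pv_tables_ext (pv_shape_relax maps N M v) hs
        intro x y hx hy
        have h1 := pv_relax_le (maps := maps) (N := N) (M := M) (v := v) x y hx hy
        have h2 := hno x y hx hy
        omega
      omega

theorem pv_le_loopB {maps : List (List Int)} {N M : Nat} {w : List (List Int)}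
    (hw : RelaxedT maps N M w) :
    ∀ (f : Nat) (v : List (List Int)), TLE N M w v → TLE N M w (pvLoopB maps N M f v) := by
  intro f
  induction f with
  | zero => intro v h; exact h
  | succ f ih =>
    intro v h
    rw [pvLoopB]
    split
    · exact h
    · exact ih _ (pv_le_relax hw h)

-- step trichotomy for A's inner loop body
theorem pv_step_spec (maps : List (List Int)) (N M : Nat) (cx cy wall : Int)
    (v : List (List Int)) (q : List (Int × Int)) (d : Int × Int) :
    (¬ (0 ≤ d.1 + cx ∧ d.1 + cx < (N : Int) ∧ 0 ≤ d.2 + cy ∧ d.2 + cy < (M : Int)) ∧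
      pvStep maps N M cx cy wall (v, q) d = (v, q)) ∨
    ((0 ≤ d.1 + cx ∧ d.1 + cx < (N : Int) ∧ 0 ≤ d.2 + cy ∧ d.2 + cy < (M : Int)) ∧
      pvGet v (d.1 + cx).toNat (d.2 + cy).toNat ≤
        wall + pvCost maps (d.1 + cx).toNat (d.2 + cy).toNat ∧
      pvStep maps N M cx cy wall (v, q) d = (v, q)) ∨
    ((0 ≤ d.1 + cx ∧ d.1 + cx < (N : Int) ∧ 0 ≤ d.2 + cy ∧ d.2 + cy < (M : Int)) ∧
      wall + pvCost maps (d.1 + cx).toNat (d.2 + cy).toNat <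
        pvGet v (d.1 + cx).toNat (d.2 + cy).toNat ∧
      pvStep maps N M cx cy wall (v, q) d =
        (pvSet v (d.1 + cx).toNat (d.2 + cy).toNat
          (wall + pvCost maps (d.1 + cx).toNat (d.2 + cy).toNat),
         q ++ [(d.1 + cx, d.2 + cy)])) := by
  unfold pvStep pvCost
  by_cases hb : 0 ≤ d.1 + cx ∧ d.1 + cx < (N : Int) ∧ 0 ≤ d.2 + cy ∧ d.2 + cy < (M : Int)
  · rw [if_pos hb]
    by_cases h1 : (maps.getD (d.1 + cx).toNat []).getD (d.2 + cy).toNat 0 = 1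
    · rw [if_pos h1, if_pos h1]
      by_cases h2 : wall + 1 < pvGet v (d.1 + cx).toNat (d.2 + cy).toNat
      · exact Or.inr (Or.inr ⟨hb, h2, by rw [if_pos h2]⟩)
      · exact Or.inr (Or.inl ⟨hb, by omega, by rw [if_neg h2]⟩)
    · rw [if_neg h1, if_neg h1]
      by_cases h2 : wall < pvGet v (d.1 + cx).toNat (d.2 + cy).toNat
      · refine Or.inr (Or.inr ⟨hb, by omega, ?_⟩)
        rw [if_pos h2, add_zero]
      · exact Or.inr (Or.inl ⟨hb, by omega, by rw [if_neg h2]⟩)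
  · exact Or.inl ⟨hb, by rw [if_neg hb]⟩

theorem pv_tgt_ne_cur {d : Int × Int} (hd : d ∈ pvDirs) {cx cy : Int}
    (h1 : 0 ≤ cx) (h2 : 0 ≤ cy) (h3 : 0 ≤ d.1 + cx) (h4 : 0 ≤ d.2 + cy) :
    ¬ ((d.1 + cx).toNat = cx.toNat ∧ (d.2 + cy).toNat = cy.toNat) := by
  simp only [pvDirs, List.mem_cons, List.not_mem_nil, or_false] at hd
  rcases hd with h | h | h | h <;> subst h <;> simp <;> omega

theorem pv_relaxedDir_antitone {maps : List (List Int)} {N M : Nat} {v' v : List (List Int)}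
    {x y : Nat} {d : Int × Int} (hle : TLE N M v' v) (hcur : pvGet v' x y = pvGet v x y)
    (h : RelaxedDir maps N M v x y d) : RelaxedDir maps N M v' x y d := by
  intro nx ny hnx hny h1 h2 h3 h4
  have ht := h nx ny hnx hny h1 h2 h3 h4
  have hle' := hle nx.toNat ny.toNat (by omega) (by omega)
  rw [hcur]
  omega

-- the fold over the four directions: all invariants in one statement
theorem pv_fold_spec {maps : List (List Int)} {N M : Nat} {w : List (List Int)}
    (hwR : RelaxedT maps N M w) (hwN : NonnegT N M w)
    {cx cy : Int} (hc1 : 0 ≤ cx) (hc2 : cx < (N : Int)) (hc3 : 0 ≤ cy) (hc4 : cy < (M : Int))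
    {wall : Int} :
    ∀ (ds : List (Int × Int)), (∀ d ∈ ds, d ∈ pvDirs) →
    ∀ (v : List (List Int)) (q : List (Int × Int)),
      Shape N M v → TLE N M w v → UBT N M v → pvGet v 0 0 = 0 → (∀ p ∈ q, InB N M p) →
      wall = pvGet v cx.toNat cy.toNat →
      Shape N M (ds.foldl (pvStep maps N M cx cy wall) (v, q)).1 ∧
      TLE N M w (ds.foldl (pvStep maps N M cx cy wall) (v, q)).1 ∧
      UBT N M (ds.foldl (pvStep maps N M cx cy wall) (v, q)).1 ∧
      pvGet (ds.foldl (pvStep maps N M cx cy wall) (v, q)).1 0 0 = 0 ∧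
      (∀ p ∈ (ds.foldl (pvStep maps N M cx cy wall) (v, q)).2, InB N M p) ∧
      TLE N M (ds.foldl (pvStep maps N M cx cy wall) (v, q)).1 v ∧
      pvGet (ds.foldl (pvStep maps N M cx cy wall) (v, q)).1 cx.toNat cy.toNat =
        pvGet v cx.toNat cy.toNat ∧
      (∀ p ∈ q, p ∈ (ds.foldl (pvStep maps N M cx cy wall) (v, q)).2) ∧
      (∀ x y, x < N → y < M →
        pvGet (ds.foldl (pvStep maps N M cx cy wall) (v, q)).1 x y = pvGet v x y ∨
        ((x : Int), (y : Int)) ∈ (ds.foldl (pvStep maps N M cx cy wall) (v, q)).2) ∧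
      2 * SN N M (ds.foldl (pvStep maps N M cx cy wall) (v, q)).1 +
        (ds.foldl (pvStep maps N M cx cy wall) (v, q)).2.length ≤ 2 * SN N M v + q.length ∧
      (∀ d ∈ ds, RelaxedDir maps N M (ds.foldl (pvStep maps N M cx cy wall) (v, q)).1
        cx.toNat cy.toNat d) := by
  intro ds
  induction ds with
  | nil =>
    intro _ v q hsh hwv hub h00 hqb hwall
    refine ⟨hsh, hwv, hub, h00, hqb, fun x y hx hy => le_refl _, rfl,
      fun p hp => hp, fun x y _ _ => Or.inl rfl, le_refl _, by simp⟩
  | cons d ds ih =>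
    intro hds v q hsh hwv hub h00 hqb hwall
    have hd : d ∈ pvDirs := hds d List.mem_cons_self
    have hds' : ∀ d' ∈ ds, d' ∈ pvDirs := fun d' h => hds d' (List.mem_cons_of_mem d h)
    have hcxt : ((cx.toNat : Int)) = cx := Int.toNat_of_nonneg hc1
    have hcyt : ((cy.toNat : Int)) = cy := Int.toNat_of_nonneg hc3
    have hcxb : cx.toNat < N := by omega
    have hcyb : cy.toNat < M := by omega
    rcases pv_step_spec maps N M cx cy wall v q d with ⟨hnb, hstep⟩ | ⟨hb, hni, hstep⟩ |
      ⟨hb, himp, hstep⟩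
    · -- target out of bounds: the step is the identity
      obtain ⟨hS, hW, hU, h0, hQ, hLE, hC, hQS, hCH, hM, hR⟩ :=
        ih hds' v q hsh hwv hub h00 hqb hwall
      rw [List.foldl_cons, hstep]
      refine ⟨hS, hW, hU, h0, hQ, hLE, hC, hQS, hCH, hM, ?_⟩
      intro d' hd'
      rcases List.mem_cons.mp hd' with h | h
      · rw [h]
        intro nx ny hnx hny h1 h2 h3 h4
        exact absurd ⟨by omega, by omega, by omega, by omega⟩ hnb
      · exact hR d' h
    · -- in bounds but no improvement: the step is the identity, yet d is relaxed
      obtain ⟨hS, hW, hU, h0, hQ, hLE, hC, hQS, hCH, hM, hR⟩ :=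
        ih hds' v q hsh hwv hub h00 hqb hwall
      rw [List.foldl_cons, hstep]
      refine ⟨hS, hW, hU, h0, hQ, hLE, hC, hQS, hCH, hM, ?_⟩
      intro d' hd'
      rcases List.mem_cons.mp hd' with h | h
      · rw [h]
        refine pv_relaxedDir_antitone hLE hC ?_
        intro nx ny hnx hny h1 h2 h3 h4
        have e1 : nx.toNat = (d.1 + cx).toNat := by omega
        have e2 : ny.toNat = (d.2 + cy).toNat := by omega
        rw [e1, e2, ← hwall]
        exact hni
      · exact hR d' h
    · -- improvement: one cell is overwritten and its coordinates are appended to q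
      set t1 := (d.1 + cx).toNat with ht1
      set t2 := (d.2 + cy).toNat with ht2
      set c := pvCost maps t1 t2 with hcdef
      have ht1b : t1 < N := by omega
      have ht2b : t2 < M := by omega
      have hcost := pv_cost_nonneg maps t1 t2
      have hw_cur : pvGet w cx.toNat cy.toNat ≤ wall := by
        rw [hwall]; exact hwv _ _ hcxb hcyb
      have hwall_nn : 0 ≤ wall := le_trans (hwN _ _ hcxb hcyb) hw_cur
      have hw_t : pvGet w t1 t2 ≤ wall + c := by
        have hh := hwR cx.toNat cy.toNat hcxb hcyb d hd (d.1 + cx) (d.2 + cy)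
          (by omega) (by omega) (by omega) (by omega) (by omega) (by omega)
        rw [← ht1, ← ht2] at hh
        omega
      have htne : ¬ (t1 = cx.toNat ∧ t2 = cy.toNat) :=
        pv_tgt_ne_cur hd hc1 hc3 (by omega) (by omega)
      have ht0 : ¬ (t1 = 0 ∧ t2 = 0) := by
        rintro ⟨e1, e2⟩
        rw [e1, e2, h00] at himp
        omega
      set v1 := pvSet v t1 t2 (wall + c) with hv1
      set q1 := q ++ [(d.1 + cx, d.2 + cy)] with hq1
      have hget1 : pvGet v1 t1 t2 = wall + c := pv_get_set_self hsh ht1b ht2b _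
      have hgetne : ∀ x y : Nat, ¬ (x = t1 ∧ y = t2) → pvGet v1 x y = pvGet v x y := by
        intro x y h
        exact pv_get_set_ne (by tauto) _
      have hS1 : Shape N M v1 := pv_shape_set hsh _ _ _
      have hW1 : TLE N M w v1 := by
        intro x y hx hy
        by_cases h : x = t1 ∧ y = t2
        · obtain ⟨e1, e2⟩ := h; subst e1; subst e2
          rw [hget1]; exact hw_t
        · rw [hgetne x y h]; exact hwv x y hx hy
      have hU1 : UBT N M v1 := by
        intro x y hx hy
        by_cases h : x = t1 ∧ y = t2
        · obtain ⟨e1, e2⟩ := h; subst e1; subst e2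
          rw [hget1]
          have := hub t1 t2 ht1b ht2b
          omega
        · rw [hgetne x y h]; exact hub x y hx hy
      have h01 : pvGet v1 0 0 = 0 := by rw [hgetne 0 0 (by tauto)]; exact h00
      have hQ1 : ∀ p ∈ q1, InB N M p := by
        intro p hp
        rcases List.mem_append.mp hp with h | h
        · exact hqb p h
        · rw [List.mem_singleton.mp h]
          exact ⟨by omega, by omega, by omega, by omega⟩
      have hC1 : pvGet v1 cx.toNat cy.toNat = pvGet v cx.toNat cy.toNat :=
        hgetne _ _ (by tauto)
      have hLE1 : TLE N M v1 v := by
        intro x y hx hy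
        by_cases h : x = t1 ∧ y = t2
        · obtain ⟨e1, e2⟩ := h; subst e1; subst e2
          rw [hget1]; omega
        · rw [hgetne x y h]
      have hN1 : NonnegT N M v1 := by
        intro x y hx hy
        by_cases h : x = t1 ∧ y = t2
        · obtain ⟨e1, e2⟩ := h; subst e1; subst e2
          rw [hget1]; omega
        · rw [hgetne x y h]
          exact le_trans (hwN x y hx hy) (hwv x y hx hy)
      have hSN1 : SN N M v1 < SN N M v := by
        apply pv_SN_lt hLE1 hN1
        exact ⟨t1, t2, ht1b, ht2b, by rw [hget1]; omega⟩
      have hRD1 : RelaxedDir maps N M v1 cx.toNat cy.toNat d := by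
        intro nx ny hnx hny h1 h2 h3 h4
        have e1 : nx.toNat = t1 := by omega
        have e2 : ny.toNat = t2 := by omega
        rw [e1, e2, hget1, hC1, ← hwall, ← hcdef]
      obtain ⟨hS, hW, hU, h0, hQ, hLE, hC, hQS, hCH, hM, hR⟩ :=
        ih hds' v1 q1 hS1 hW1 hU1 h01 hQ1 (by rw [← hwall] at hC1; exact hC1.symm)
      rw [List.foldl_cons, hstep]
      refine ⟨hS, hW, hU, h0, hQ, ?_, ?_, ?_, ?_, ?_, ?_⟩
      · intro x y hx hy
        exact le_trans (hLE x y hx hy) (hLE1 x y hx hy)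
      · rw [hC, hC1]
      · intro p hp
        exact hQS p (List.mem_append_left _ hp)
      · intro x y hx hy
        rcases hCH x y hx hy with h | h
        · by_cases h' : x = t1 ∧ y = t2
          · obtain ⟨e1, e2⟩ := h'; subst e1; subst e2
            refine Or.inr (hQS _ (List.mem_append_right _ (List.mem_singleton.mpr ?_)))
            rw [Prod.mk.injEq]
            exact ⟨by omega, by omega⟩
          · exact Or.inl (by rw [h, hgetne x y h'])
        · exact Or.inr h
      · have : q1.length = q.length + 1 := by simp [hq1]
        omega
      · intro d' hd'
        rcases List.mem_cons.mp hd' with h | h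
        · rw [h]
          exact pv_relaxedDir_antitone hLE hC hRD1
        · exact hR d' h

theorem pv_loopA_spec {maps : List (List Int)} {N M : Nat} {w : List (List Int)}
    (hwR : RelaxedT maps N M w) (hwN : NonnegT N M w) :
    ∀ (fuel : Nat) (v : List (List Int)) (q : List (Int × Int)),
      GoodA maps N M w v q → 2 * SN N M v + q.length < fuel →
      Shape N M (pvLoopA maps N M fuel v q) ∧
      TLE N M w (pvLoopA maps N M fuel v q) ∧
      UBT N M (pvLoopA maps N M fuel v q) ∧
      pvGet (pvLoopA maps N M fuel v q) 0 0 = 0 ∧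
      RelaxedT maps N M (pvLoopA maps N M fuel v q) := by
  intro fuel
  induction fuel with
  | zero => intro v q _ h; omega
  | succ f ih =>
    intro v q hgood hfuel
    obtain ⟨hsh, hwv, hub, h00, hqb, hrelq⟩ := hgood
    match q with
    | [] =>
      refine ⟨hsh, hwv, hub, h00, ?_⟩
      intro x y hx hy
      rcases hrelq x y hx hy with h | h
      · exact h
      · exact absurd h (List.not_mem_nil)
    | (cx, cy) :: q' =>
      have hcb := hqb (cx, cy) List.mem_cons_self
      have hc1 : 0 ≤ cx := hcb.1
      have hc2 : cx < (N : Int) := hcb.2.1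
      have hc3 : 0 ≤ cy := hcb.2.2.1
      have hc4 : cy < (M : Int) := hcb.2.2.2
      have hqb' : ∀ p ∈ q', InB N M p := fun p hp => hqb p (List.mem_cons_of_mem _ hp)
      have hcxb : cx.toNat < N := by omega
      have hcyb : cy.toNat < M := by omega
      obtain ⟨hS, hW, hU, h0, hQ, hLE, hC, hQS, hCH, hM, hR⟩ :=
        pv_fold_spec hwR hwN hc1 hc2 hc3 hc4 pvDirs (fun _ hd => hd) v q'
          hsh hwv hub h00 hqb' rfl
      show Shape N M (pvLoopA maps N M (f + 1) v ((cx, cy) :: q')) ∧ _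
      rw [pvLoopA]
      apply ih
      · refine ⟨hS, hW, hU, h0, hQ, ?_⟩
        intro x y hx hy
        by_cases hcur : x = cx.toNat ∧ y = cy.toNat
        · obtain ⟨e1, e2⟩ := hcur; subst e1; subst e2
          exact Or.inl (fun d hd => hR d hd)
        · rcases hrelq x y hx hy with h | h
          · rcases hCH x y hx hy with heq | hmem
            · exact Or.inl (fun d hd => pv_relaxedDir_antitone hLE heq (h d hd))
            · exact Or.inr hmem
          · rcases List.mem_cons.mp h with h' | h'
            · rw [Prod.mk.injEq] at h'
              exact absurd ⟨by omega, by omega⟩ hcur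
            · exact Or.inr (hQS _ h')
      · have : ((cx, cy) :: q').length = q'.length + 1 := rfl
        omega

-- ===== VERDICT (by name: the statement is the Claim_ definition above) =====
theorem solution_spec : Claim_equal_solution := by
  intro maps _ hpre
  obtain ⟨hne, hM0, _⟩ := hpre
  unfold Spec_solution solution solution_alt
  set N := maps.length with hN
  set M := (maps.headD []).length with hM
  have hN0 : 0 < N := List.length_pos_iff.mpr hne
  -- facts about the initial table
  have hshI : Shape N M (pvInit N M) := pv_shape_init N M
  have hNNI : NonnegT N M (pvInit N M) := by
    intro x y hx hy
    rw [pv_get_init hx hy]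
    split <;> omega
  have hUBI : UBT N M (pvInit N M) := by
    intro x y hx hy
    rw [pv_get_init hx hy]
    split <;> omega
  have hI00 : pvGet (pvInit N M) 0 0 = 0 := by
    rw [pv_get_init hN0 hM0]
    simp
  -- facts about B's final table L
  set L := pvLoopB maps N M (100000 * (N * M) + 1) (pvInit N M) with hL
  have hSNI : SN N M (pvInit N M) ≤ 100000 * (N * M) := pv_SN_le hUBI
  have hfixL : pvRelax maps N M L = L :=
    pv_loopB_fix _ (pvInit N M) hshI hNNI (by omega)
  have hRL : RelaxedT maps N M L := pv_relaxed_of_fix hfixL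
  have hNL : NonnegT N M L := pv_loopB_nonneg hNNI _
  have hLI : TLE N M L (pvInit N M) := pv_loopB_le _ _
  -- A's initial state is good with respect to L
  have hgood : GoodA maps N M L (pvInit N M) [((0 : Int), (0 : Int))] := by
    refine ⟨hshI, hLI, hUBI, hI00, ?_, ?_⟩
    · intro p hp
      rw [List.mem_singleton.mp hp]
      refine ⟨le_refl _, ?_, le_refl _, ?_⟩ <;> · show (0 : Int) < _; omega
    · intro x y hx hy
      by_cases h : x = 0 ∧ y = 0
      · obtain ⟨e1, e2⟩ := h; subst e1; subst e2
        exact Or.inr (by simp)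
      · left
        intro d hd nx ny hnx hny h1 h2 h3 h4
        have hb1 : nx.toNat < N := by omega
        have hb2 : ny.toNat < M := by omega
        rw [pv_get_init hb1 hb2, pv_get_init hx hy, if_neg h]
        have := pv_cost_nonneg maps nx.toNat ny.toNat
        split <;> omega
  obtain ⟨hshR, hLR, hUBR, hR00, hRelR⟩ :=
    pv_loopA_spec hRL hNL (2 * 100000 * (N * M) + 2) (pvInit N M)
      [((0 : Int), (0 : Int))] hgood (by simp only [List.length_singleton]; omega)
  set r := pvLoopA maps N M (2 * 100000 * (N * M) + 2) (pvInit N M)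
    [((0 : Int), (0 : Int))] with hr
  have hRle_init : TLE N M r (pvInit N M) := by
    intro x y hx hy
    rw [pv_get_init hx hy]
    by_cases h : x = 0 ∧ y = 0
    · obtain ⟨e1, e2⟩ := h; subst e1; subst e2
      rw [if_pos ⟨rfl, rfl⟩, hR00]
    · rw [if_neg h]
      exact hUBR x y hx hy
  have hRleL : TLE N M r L := pv_le_loopB hRelR _ (pvInit N M) hRle_init
  exact le_antisymm (hRleL (N - 1) (M - 1) (by omega) (by omega))
    (hLR (N - 1) (M - 1) (by omega) (by omega))
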